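-- pv_equiv track=rewrite | github.com/eviiee/BJ_jja0122 | BOJ/250322/12851 숨바꼭질 2.py | solve
-- ===== SOURCE A (Python) =====
-- def solve(n, k):
--
--     if k <= n : return (n - k, 1)
--     from collections import deque
--
--     q = deque([n])
--     V = [[0, 0] for _ in range(k + 2)]
--     V[n] = [1, 1]
--
--     while q:
--         x = q.popleft()
--         c = V[x][0]
--
--         for y in (x-1, x+1, x*2):
--
--             nc = c + 1
--
--             if V[k][0] and V[k][0] < nc : continue
--             if not 0<y<len(V): continue
--
--             if V[y][0]:
--                 if nc > V[y][0] : continue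
--             else:
--                 V[y][0] = nc
--                 q.append(y)
--
--             V[y][1] += V[x][1]
--
--     return (V[k][0] - 1, V[k][1])
-- ===== SOURCE B (Python) =====
-- def solve(n, k):
--     if k <= n:
--         return (n - k, 1)
--     # level-synchronous BFS: frontier holds (position, number-of-shortest-paths) pairs
--     seen = {n}
--     frontier = [(n, 1)]
--     d = 0
--     while frontier:
--         for y, c in frontier:
--             if y == k:
--                 return (d, c)
--         nxt = {}
--         for x, c in frontier:
--             for y in (x - 1, x + 1, 2 * x):
--                 if 0 < y <= k + 1 and y not in seen:
--                     nxt[y] = nxt.get(y, 0) + c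
--         seen.update(nxt)
--         frontier = list(nxt.items())
--         d += 1
--     return (-1, 0)  # k unreachable (cannot happen for 0 <= n < k)
-- ===== Notes on version B (the rewrite author's own statement) =====
-- stated objective: alternative
-- what changed: A's fused deque-BFS that tracks distance+1 and path counts in one mutable array with k-distance pruning is replaced by a level-synchronous BFS that builds, per level, a dictionary mapping newly reached positions to their shortest-path counts and returns as soon as k appears in a level.
-- intended difference: For n = -2 < k, A's negative-index write V[n] = [1,1] wraps onto V[k] so A returns (0, 1) as if k were already reached in 0 steps; B returns (-1, 0), the unreachable sentinel, which is intended since a negative start can never reach k under A's own 0 < y bound. — e.g. on solve(-2, 0): A returns (0, 1), B returns (-1, 0)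
import Mathlib
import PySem

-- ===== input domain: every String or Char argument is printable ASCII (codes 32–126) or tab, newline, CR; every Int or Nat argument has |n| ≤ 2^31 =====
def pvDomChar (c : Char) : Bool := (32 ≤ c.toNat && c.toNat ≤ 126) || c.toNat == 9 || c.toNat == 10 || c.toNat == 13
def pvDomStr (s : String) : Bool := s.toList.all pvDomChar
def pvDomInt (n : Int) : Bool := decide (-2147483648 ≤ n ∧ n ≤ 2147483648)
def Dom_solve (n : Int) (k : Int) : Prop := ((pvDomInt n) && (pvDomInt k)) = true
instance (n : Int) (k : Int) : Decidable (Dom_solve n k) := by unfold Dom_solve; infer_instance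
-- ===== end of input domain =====

-- B replaces A's fused deque-BFS (distance+1 and path counts maintained in one array, with
-- k-distance pruning) by a level-synchronous BFS building a per-level dictionary of path counts
-- (objective: alternative algorithmic decomposition, same asymptotic cost).

-- ===== PORT A =====
-- Python's list V of k+2 pairs is used purely as an index→pair map; it is ported as a total
-- function Int → Int × Int together with Python's negative-index rule (pyListIdx).  Every
-- subscript the Python performs is performed here through pyListIdx; indices that would raise
-- IndexError in Python are exactly the ones excluded by Pre_solve below.
def updV (V : Int → Int × Int) (i : Int) (v : Int × Int) : Int → Int × Int :=
  fun j => if j = i then v else V j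

def pyListIdx (size i : Int) : Int := if i < 0 then i + size else i

-- one neighbour y of x inside A's while-loop body (c = V[x][0]); returns the updated (V, queue)
def solveStepA (k x y c : Int) (V : Int → Int × Int) (q : List Int) :
    (Int → Int × Int) × List Int :=
  if (V (pyListIdx (k + 2) k)).1 ≠ 0 ∧ (V (pyListIdx (k + 2) k)).1 < c + 1 then (V, q)
  else if ¬(0 < y ∧ y < k + 2) then (V, q)
  else if (V y).1 ≠ 0 then
    if c + 1 > (V y).1 then (V, q)
    else (updV V y ((V y).1, (V y).2 + (V (pyListIdx (k + 2) x)).2), q)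
  else
    -- V[y][0] = nc; q.append(y); V[y][1] += V[x][1]
    (updV (updV V y (c + 1, (V y).2)) y
      ((updV V y (c + 1, (V y).2) y).1,
       (updV V y (c + 1, (V y).2) y).2 + (updV V y (c + 1, (V y).2) (pyListIdx (k + 2) x)).2),
     q ++ [y])

-- A's 'while q:' loop; the fuel is a guard that only makes the recursion total — the proofs
-- below show the fuel passed by 'solve' is never exhausted on inputs satisfying Pre_solve.
def solveLoopA (k : Int) : Nat → List Int → (Int → Int × Int) → Int × Int
  | 0, _, V => ((V (pyListIdx (k + 2) k)).1 - 1, (V (pyListIdx (k + 2) k)).2)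
  | _ + 1, [], V => ((V (pyListIdx (k + 2) k)).1 - 1, (V (pyListIdx (k + 2) k)).2)
  | fuel + 1, x :: q', V =>
    let c := (V (pyListIdx (k + 2) x)).1
    let s1 := solveStepA k x (x - 1) c V q'
    let s2 := solveStepA k x (x + 1) c s1.1 s1.2
    let s3 := solveStepA k x (x * 2) c s2.1 s2.2
    solveLoopA k fuel s3.2 s3.1

def solve (n : Int) (k : Int) : Int × Int :=
  if k ≤ n then (n - k, 1)
  else
    solveLoopA k (3 * (k + 2).toNat + 3) [n]
      (updV (fun _ => (0, 0)) (pyListIdx (k + 2) n) (1, 1))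

-- ===== PORT B =====
-- one neighbour y inside B's dictionary-building inner loop (c = count of x)
def bNbrStep (k : Int) (seen : PySem.Set Int) (c : Int)
    (nxt : PySem.Dict Int Int) (y : Int) : PySem.Dict Int Int :=
  if 0 < y ∧ y ≤ k + 1 ∧ y ∉ seen then nxt.insert y (nxt.getD y 0 + c) else nxt

-- B's 'for y in (x-1, x+1, 2*x):' loop for one frontier pair p = (x, c)
def bInner (k : Int) (seen : PySem.Set Int) (nxt : PySem.Dict Int Int)
    (p : Int × Int) : PySem.Dict Int Int :=
  [p.1 - 1, p.1 + 1, 2 * p.1].foldl (bNbrStep k seen p.2) nxt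

def bLevelNext (k : Int) (seen : PySem.Set Int) (fr : List (Int × Int)) : PySem.Dict Int Int :=
  fr.foldl (bInner k seen) PySem.Dict.empty

-- B's 'while frontier:' loop; fuel is a totality guard, proved sufficient below.
def solveLoopB (k : Int) : Nat → PySem.Set Int → List (Int × Int) → Int → Int × Int
  | 0, _, _, _ => (-1, 0)
  | fuel + 1, seen, fr, d =>
    if fr.isEmpty then (-1, 0)
    else
      match fr.find? (fun p => p.1 == k) with
      | some p => (d, p.2)
      | none =>
        let nxt := bLevelNext k seen fr
        solveLoopB k fuel (PySem.Set.update seen nxt.keys) nxt.items (d + 1)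

def solve_alt (n : Int) (k : Int) : Int × Int :=
  if k ≤ n then (n - k, 1)
  else solveLoopB k ((k + 2).toNat + 2) (PySem.Set.ofList [n]) [(n, 1)] 0

-- ===== PRECONDITION & SPEC =====
-- Pre_solve holds exactly where the Python A returns normally: for k > n, A raises IndexError
-- iff the seed write V[n] is out of range, i.e. iff n < -(k+2) (this also covers k+2 ≤ 0).
def Pre_solve (n : Int) (k : Int) : Prop := k ≤ n ∨ -(k + 2) ≤ n
instance (n : Int) (k : Int) : Decidable (Pre_solve n k) := by unfold Pre_solve; infer_instance

def pvWitness_solve : Int × Int := (0, 5)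

-- For n = -2 < k, A's negative-index seed V[n] = [1,1] lands on V[k], so A returns (0, 1) as if
-- k were reached in 0 steps; B returns (-1, 0), the unreachable sentinel, which is the intended
-- value since a negative start can never reach k under A's own 0 < y bound.
def D_solve (n : Int) (k : Int) : Prop := n = -2 ∧ n < k
instance (n : Int) (k : Int) : Decidable (D_solve n k) := by unfold D_solve; infer_instance

def Spec_solve (n : Int) (k : Int) (out : Int × Int) : Prop := ¬ D_solve n k → out = solve_alt n k
instance (n : Int) (k : Int) (out : Int × Int) : Decidable (Spec_solve n k out) := by
  unfold Spec_solve; infer_instance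

def pvDiffWitness_solve : Int × Int := (-2, 0)
def pvDiffWitnessOut_solve : (Int × Int) × (Int × Int) := ((0, 1), (-1, 0))

-- ===== CLAIM (what is proved, stated in full; the proofs are below) =====
def Claim_unchanged_solve : Prop :=
  ∀ (n : Int) (k : Int), Dom_solve n k → Pre_solve n k → Spec_solve n k (solve n k)

def Claim_changed_solve : Prop :=
  Dom_solve (pvDiffWitness_solve.1) (pvDiffWitness_solve.2) ∧
  Pre_solve (pvDiffWitness_solve.1) (pvDiffWitness_solve.2) ∧
  D_solve (pvDiffWitness_solve.1) (pvDiffWitness_solve.2) ∧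
  solve (pvDiffWitness_solve.1) (pvDiffWitness_solve.2) = pvDiffWitnessOut_solve.1 ∧
  solve_alt (pvDiffWitness_solve.1) (pvDiffWitness_solve.2) = pvDiffWitnessOut_solve.2 ∧
  pvDiffWitnessOut_solve.1 ≠ pvDiffWitnessOut_solve.2

def Claim_exact_solve : Prop :=
  ∀ (n : Int) (k : Int), Dom_solve n k → Pre_solve n k → D_solve n k → solve n k ≠ solve_alt n k

-- ===== LEMMAS AND PROOFS =====

@[simp] theorem updV_self (V : Int → Int × Int) (i : Int) (v : Int × Int) : updV V i v i = v := by
  simp [updV]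

theorem updV_ne (V : Int → Int × Int) (i : Int) (v : Int × Int) {j : Int} (h : j ≠ i) :
    updV V i v j = V j := by simp [updV, h]

theorem updV_updV (V : Int → Int × Int) (i : Int) (a b : Int × Int) :
    updV (updV V i a) i b = updV V i b := by
  funext j; by_cases h : j = i <;> simp [updV, h]

theorem pyListIdx_nonneg (s : Int) {i : Int} (h : 0 ≤ i) : pyListIdx s i = i := by
  simp [pyListIdx]; omega

theorem pyListIdx_neg (s : Int) {i : Int} (h : i < 0) : pyListIdx s i = i + s := by
  simp [pyListIdx, h]

-- keys of a PySem.Dict are the first components of its items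
theorem dictKeys_eq (d : PySem.Dict Int Int) : d.keys = d.items.map Prod.fst := rfl

theorem dictItems_empty : (PySem.Dict.empty : PySem.Dict Int Int).items = [] := by
  have h := PySem.Dict.keys_empty (κ := Int) (ν := Int)
  rw [dictKeys_eq] at h
  exact List.map_eq_nil_iff.mp h

theorem dict_get?_of_contains (d : PySem.Dict Int Int) (x : Int) (h : d.contains x = true) :
    ∃ c, d.get? x = some c := by
  rw [PySem.Dict.contains_eq_isSome_get?] at h
  exact Option.isSome_iff_exists.mp h

theorem dict_fresh_of_get?_none (d : PySem.Dict Int Int) (x : Int) (h : d.get? x = none) :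
    d.contains x = false := by
  rw [PySem.Dict.contains_eq_isSome_get?, h]; rfl

-- first-match lookup in an association list with distinct keys
theorem find?_eq_of_nodup_keys {l : List (Int × Int)} {x c : Int}
    (hnd : (l.map Prod.fst).Nodup) (h : (x, c) ∈ l) :
    l.find? (fun p => p.1 == x) = some (x, c) := by
  induction l with
  | nil => cases h
  | cons a t ih =>
    rcases List.mem_cons.mp h with h | h
    · subst h; simp [List.find?]
    · have h1 : a.1 ∉ t.map Prod.fst := (List.nodup_cons.mp hnd).1
      have hne : ¬((a.1 == x) = true) := by
        intro hax
        have hax' : a.1 = x := by simpa using hax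
        exact h1 (hax' ▸ List.mem_map.mpr ⟨(x, c), h, rfl⟩)
      rw [List.find?_cons_of_neg (p := fun q => q.1 == x) (l := t) (a := a) hne]
      exact ih (List.nodup_cons.mp hnd).2 h

-- ---------- potential function for A's loop ----------
noncomputable def MU (k : Int) (V : Int → Int × Int) : Nat :=
  ((Finset.Icc (1 : Int) (k + 1)).filter (fun y => (V y).1 = 0)).card

noncomputable def MM (k : Int) (q : List Int) (V : Int → Int × Int) : Nat := q.length + 2 * MU k V

theorem MU_le (k : Int) (V : Int → Int × Int) : MU k V ≤ (k + 1).toNat := by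
  refine le_trans (Finset.card_filter_le _ _) (le_of_eq ?_)
  rw [Int.card_Icc]
  congr 1; ring

theorem MU_same (k : Int) (V : Int → Int × Int) (y : Int) (v : Int × Int)
    (h : v.1 = (V y).1) : MU k (updV V y v) = MU k V := by
  unfold MU
  congr 1
  apply Finset.filter_congr
  intro z _
  by_cases hz : z = y
  · subst hz; simp [updV, h]
  · simp [updV, hz]

theorem MU_flip (k : Int) (V : Int → Int × Int) (y : Int) (v : Int × Int)
    (hy : y ∈ Finset.Icc (1 : Int) (k + 1)) (h0 : (V y).1 = 0) (hv : v.1 ≠ 0) :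
    MU k (updV V y v) + 1 = MU k V := by
  unfold MU
  have hset : (Finset.Icc (1 : Int) (k + 1)).filter (fun z => ((updV V y v) z).1 = 0)
      = ((Finset.Icc (1 : Int) (k + 1)).filter (fun z => (V z).1 = 0)).erase y := by
    ext z
    simp only [Finset.mem_filter, Finset.mem_erase]
    constructor
    · intro ⟨hz, hv0⟩
      by_cases hzy : z = y
      · subst hzy; rw [updV_self] at hv0; exact absurd hv0 hv
      · rw [updV_ne _ _ _ hzy] at hv0; exact ⟨hzy, hz, hv0⟩
    · intro ⟨hzy, hz, hv0⟩
      exact ⟨hz, by rw [updV_ne _ _ _ hzy]; exact hv0⟩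
  rw [hset, Finset.card_erase_of_mem (by simp [Finset.mem_filter, hy, h0])]
  have hpos : 0 < ((Finset.Icc (1 : Int) (k + 1)).filter (fun z => (V z).1 = 0)).card :=
    Finset.card_pos.mpr ⟨y, by simp [Finset.mem_filter, hy, h0]⟩
  omega

-- ---------- B's abstract level states ----------
def stS (n k : Int) : Nat → PySem.Set Int × List (Int × Int)
  | 0 => (PySem.Set.ofList [n], [(n, 1)])
  | d + 1 =>
    let s := stS n k d
    let nxt := bLevelNext k s.1 s.2
    (PySem.Set.update s.1 nxt.keys, nxt.items)

-- partial next-level dictionary after processing a prefix of the frontier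
def bPartial (k : Int) (seen : PySem.Set Int) (P : List (Int × Int)) : PySem.Dict Int Int :=
  P.foldl (bInner k seen) PySem.Dict.empty

theorem bLevelNext_eq_bPartial (k : Int) (seen : PySem.Set Int) (fr : List (Int × Int)) :
    bLevelNext k seen fr = bPartial k seen fr := rfl

-- ---------- keys of the level dictionaries ----------
theorem keys_bNbrStep_nodup {k : Int} {seen : PySem.Set Int} {c : Int}
    {nxt : PySem.Dict Int Int} {y : Int} (h : nxt.keys.Nodup) :
    (bNbrStep k seen c nxt y).keys.Nodup := by
  unfold bNbrStep; split
  · exact PySem.Dict.nodup_keys_insert _ _ _ h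
  · exact h

theorem mem_keys_bNbrStep {k : Int} {seen : PySem.Set Int} {c : Int}
    {nxt : PySem.Dict Int Int} {y z : Int} (h : z ∈ (bNbrStep k seen c nxt y).keys) :
    z ∈ nxt.keys ∨ (0 < z ∧ z ≤ k + 1 ∧ z ∉ seen) := by
  unfold bNbrStep at h; split at h
  · rcases (PySem.Dict.mem_keys_insert _ _ _ _).mp h with h | h
    · subst h; right; assumption
    · left; exact h
  · left; exact h

theorem mem_keys_bNbrStep_mono {k : Int} {seen : PySem.Set Int} {c : Int}
    {nxt : PySem.Dict Int Int} {y z : Int} (h : z ∈ nxt.keys) :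
    z ∈ (bNbrStep k seen c nxt y).keys := by
  unfold bNbrStep; split
  · exact (PySem.Dict.mem_keys_insert _ _ _ _).mpr (Or.inr h)
  · exact h

theorem mem_keys_bNbrStep_self {k : Int} {seen : PySem.Set Int} {c : Int}
    {nxt : PySem.Dict Int Int} {y : Int} (hg : 0 < y ∧ y ≤ k + 1 ∧ y ∉ seen) :
    y ∈ (bNbrStep k seen c nxt y).keys := by
  unfold bNbrStep; rw [if_pos hg]
  exact (PySem.Dict.mem_keys_insert _ _ _ _).mpr (Or.inl rfl)

theorem keys_bInner_nodup {k : Int} {seen : PySem.Set Int} {nxt : PySem.Dict Int Int}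
    {p : Int × Int} (h : nxt.keys.Nodup) : (bInner k seen nxt p).keys.Nodup := by
  unfold bInner
  simp only [List.foldl_cons, List.foldl_nil]
  exact keys_bNbrStep_nodup (keys_bNbrStep_nodup (keys_bNbrStep_nodup h))

theorem mem_keys_bInner {k : Int} {seen : PySem.Set Int} {nxt : PySem.Dict Int Int}
    {p : Int × Int} {z : Int} (h : z ∈ (bInner k seen nxt p).keys) :
    z ∈ nxt.keys ∨ (0 < z ∧ z ≤ k + 1 ∧ z ∉ seen) := by
  unfold bInner at h
  simp only [List.foldl_cons, List.foldl_nil] at h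
  rcases mem_keys_bNbrStep h with h | h
  · rcases mem_keys_bNbrStep h with h | h
    · exact mem_keys_bNbrStep h
    · right; exact h
  · right; exact h

theorem mem_keys_bInner_mono {k : Int} {seen : PySem.Set Int} {nxt : PySem.Dict Int Int}
    {p : Int × Int} {z : Int} (h : z ∈ nxt.keys) : z ∈ (bInner k seen nxt p).keys := by
  unfold bInner
  simp only [List.foldl_cons, List.foldl_nil]
  exact mem_keys_bNbrStep_mono (mem_keys_bNbrStep_mono (mem_keys_bNbrStep_mono h))

theorem keys_foldl_inner_nodup (k : Int) (seen : PySem.Set Int) :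
    ∀ (P : List (Int × Int)) (nxt : PySem.Dict Int Int), nxt.keys.Nodup →
      (P.foldl (bInner k seen) nxt).keys.Nodup := by
  intro P
  induction P with
  | nil => intro nxt h; exact h
  | cons p t ih => intro nxt h; exact ih _ (keys_bInner_nodup h)

theorem mem_keys_foldl_inner (k : Int) (seen : PySem.Set Int) :
    ∀ (P : List (Int × Int)) (nxt : PySem.Dict Int Int) (z : Int),
      z ∈ (P.foldl (bInner k seen) nxt).keys →
      z ∈ nxt.keys ∨ (0 < z ∧ z ≤ k + 1 ∧ z ∉ seen) := by
  intro P
  induction P with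
  | nil => intro nxt z h; left; exact h
  | cons p t ih =>
    intro nxt z h
    rcases ih _ z h with h | h
    · exact mem_keys_bInner h
    · right; exact h

theorem mem_keys_foldl_inner_mono (k : Int) (seen : PySem.Set Int) :
    ∀ (P : List (Int × Int)) (nxt : PySem.Dict Int Int) (z : Int),
      z ∈ nxt.keys → z ∈ (P.foldl (bInner k seen) nxt).keys := by
  intro P
  induction P with
  | nil => intro nxt z h; exact h
  | cons p t ih => intro nxt z h; exact ih _ z (mem_keys_bInner_mono h)

theorem keys_bPartial_nodup (k : Int) (seen : PySem.Set Int) (P : List (Int × Int)) :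
    (bPartial k seen P).keys.Nodup := by
  apply keys_foldl_inner_nodup
  rw [PySem.Dict.keys_empty]; exact List.nodup_nil

theorem mem_keys_bPartial {k : Int} {seen : PySem.Set Int} {P : List (Int × Int)} {z : Int}
    (h : z ∈ (bPartial k seen P).keys) : 0 < z ∧ z ≤ k + 1 ∧ z ∉ seen := by
  rcases mem_keys_foldl_inner k seen P _ z h with h | h
  · rw [PySem.Dict.keys_empty] at h; cases h
  · exact h

theorem mem_keys_bLevelNext_of {k : Int} {seen : PySem.Set Int} {fr : List (Int × Int)}
    {p : Int × Int} {y : Int} (hp : p ∈ fr)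
    (hy : y = p.1 - 1 ∨ y = p.1 + 1 ∨ y = 2 * p.1)
    (hg : 0 < y ∧ y ≤ k + 1 ∧ y ∉ seen) : y ∈ (bLevelNext k seen fr).keys := by
  obtain ⟨s, t, rfl⟩ := List.append_of_mem hp
  unfold bLevelNext
  rw [List.foldl_append, List.foldl_cons]
  apply mem_keys_foldl_inner_mono
  unfold bInner
  simp only [List.foldl_cons, List.foldl_nil]
  rcases hy with rfl | rfl | rfl
  · exact mem_keys_bNbrStep_mono (mem_keys_bNbrStep_mono (mem_keys_bNbrStep_self hg))
  · exact mem_keys_bNbrStep_mono (mem_keys_bNbrStep_self hg)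
  · exact mem_keys_bNbrStep_self hg

-- ---------- structural facts about the level states ----------
theorem stW (n k : Int) (h0 : 0 ≤ n) (d : Nat) :
    (∀ p ∈ (stS n k d).2, p.1 ∈ (stS n k d).1) ∧
    ((stS n k d).2.map Prod.fst).Nodup ∧
    (∀ p ∈ (stS n k d).2, 0 ≤ p.1) := by
  induction d with
  | zero =>
    refine ⟨?_, ?_, ?_⟩
    · intro p hp
      simp only [stS] at hp ⊢
      rcases List.mem_singleton.mp hp with rfl
      rw [PySem.Set.ofList_eq_self_of_nodup _ (List.nodup_singleton n)]
      exact List.mem_singleton.mpr rfl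
    · simp [stS]
    · intro p hp
      simp only [stS] at hp
      rcases List.mem_singleton.mp hp with rfl
      exact h0
  | succ d _ =>
    refine ⟨?_, ?_, ?_⟩
    · intro p hp
      simp only [stS] at hp ⊢
      have : p.1 ∈ (bLevelNext k (stS n k d).1 (stS n k d).2).keys := by
        rw [dictKeys_eq]; exact List.mem_map_of_mem hp
      exact (PySem.Set.mem_update _ _ _).mpr (Or.inr this)
    · simp only [stS]
      have := keys_bPartial_nodup k (stS n k d).1 (stS n k d).2
      rw [← bLevelNext_eq_bPartial, dictKeys_eq] at this
      exact this
    · intro p hp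
      simp only [stS] at hp
      have : p.1 ∈ (bLevelNext k (stS n k d).1 (stS n k d).2).keys := by
        rw [dictKeys_eq]; exact List.mem_map_of_mem hp
      rw [bLevelNext_eq_bPartial] at this
      have := mem_keys_bPartial this
      omega

theorem seen_char (n k : Int) (d : Nat) (y : Int) :
    y ∈ (stS n k d).1 ↔ ∃ e ≤ d, y ∈ ((stS n k e).2.map Prod.fst) := by
  induction d with
  | zero =>
    simp only [stS]
    rw [PySem.Set.ofList_eq_self_of_nodup _ (List.nodup_singleton n)]
    constructor
    · intro h; exact ⟨0, le_refl 0, by simpa [stS] using h⟩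
    · intro ⟨e, he, h⟩
      interval_cases e
      simpa [stS] using h
  | succ d ih =>
    simp only [stS]
    rw [PySem.Set.mem_update]
    constructor
    · intro h
      rcases h with h | h
      · obtain ⟨e, he, h⟩ := ih.mp h
        exact ⟨e, Nat.le_succ_of_le he, h⟩
      · refine ⟨d + 1, le_refl _, ?_⟩
        simpa [stS, dictKeys_eq] using h
    · intro ⟨e, he, h⟩
      rcases Nat.le_succ_iff.mp he with he | he
      · exact Or.inl (ih.mpr ⟨e, he, h⟩)
      · subst he
        right
        simpa [stS, dictKeys_eq] using h

theorem seen_mono (n k : Int) {a b : Nat} (h : a ≤ b) {y : Int}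
    (hy : y ∈ (stS n k a).1) : y ∈ (stS n k b).1 := by
  obtain ⟨e, he, h'⟩ := (seen_char n k a y).mp hy
  exact (seen_char n k b y).mpr ⟨e, le_trans he h, h'⟩

theorem succ_seen (n k : Int) (d : Nat) (y : Int) (hy : y ∈ (stS n k d).1)
    (h1 : 0 < y + 1) (h2 : y + 1 ≤ k + 1) : y + 1 ∈ (stS n k (d + 1)).1 := by
  obtain ⟨e, he, hfe⟩ := (seen_char n k d y).mp hy
  by_cases hs : y + 1 ∈ (stS n k e).1
  · exact seen_mono n k (le_trans he (Nat.le_succ d)) hs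
  · obtain ⟨p, hp, hpy⟩ := List.mem_map.mp hfe
    have hkey : y + 1 ∈ (bLevelNext k (stS n k e).1 (stS n k e).2).keys :=
      mem_keys_bLevelNext_of hp (Or.inr (Or.inl (by omega))) ⟨h1, h2, hs⟩
    have : y + 1 ∈ ((stS n k (e + 1)).2.map Prod.fst) := by
      simpa [stS, dictKeys_eq] using hkey
    exact seen_mono n k (Nat.succ_le_succ he) ((seen_char n k (e + 1) (y + 1)).mpr
      ⟨e + 1, le_refl _, this⟩)

theorem reach (n k : Int) (h0 : 0 ≤ n) (hnk : n < k) :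
    ∃ d : Nat, k ∈ ((stS n k d).2.map Prod.fst) ∧ d ≤ (k - n).toNat := by
  have main : ∀ j : Nat, n + (j : Int) ≤ k → n + (j : Int) ∈ (stS n k j).1 := by
    intro j
    induction j with
    | zero =>
      intro _
      simp only [stS, Nat.cast_zero, add_zero]
      rw [PySem.Set.ofList_eq_self_of_nodup _ (List.nodup_singleton n)]
      exact List.mem_singleton.mpr rfl
    | succ j ih =>
      intro h
      have hj : n + (j : Int) ≤ k := by push_cast at h ⊢; omega
      have := succ_seen n k j (n + (j : Int)) (ih hj)
        (by have : (0:Int) ≤ (j:Int) := Int.natCast_nonneg j; omega)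
        (by push_cast at h; omega)
      have hcast : n + ((j + 1 : Nat) : Int) = n + (j : Int) + 1 := by push_cast; ring
      rw [hcast]
      exact this
  have hk' : n + (((k - n).toNat : Nat) : Int) = k := by
    rw [Int.toNat_of_nonneg (by omega)]; ring
  have hks : k ∈ (stS n k (k - n).toNat).1 := by
    have := main (k - n).toNat (by rw [hk'])
    rwa [hk'] at this
  obtain ⟨e, he, hfe⟩ := (seen_char n k (k - n).toNat k).mp hks
  exact ⟨e, hfe, he⟩

theorem fr_persist (n k : Int) (d : Nat) (h : (stS n k d).2 = []) :
    ∀ m, (stS n k (d + m)).2 = [] := by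
  intro m
  induction m with
  | zero => exact h
  | succ m ih =>
    show (stS n k ((d + m) + 1)).2 = []
    simp only [stS, ih]
    show (bLevelNext k _ []).items = []
    unfold bLevelNext
    rw [List.foldl_nil]
    exact dictItems_empty

-- ---------- the minimal hit level and its count ----------
theorem dStar_spec (n k : Int) (hex : ∃ d, k ∈ ((stS n k d).2.map Prod.fst)) :
    k ∈ ((stS n k (Nat.find hex)).2.map Prod.fst) := Nat.find_spec hex

def cStar (n k : Int) (hex : ∃ d, k ∈ ((stS n k d).2.map Prod.fst)) : Int :=
  match ((stS n k (Nat.find hex)).2.find? (fun p => p.1 == k)) with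
  | some p => p.2
  | none => 0

theorem not_seen_iff_lt_dStar (n k : Int) (hex : ∃ d, k ∈ ((stS n k d).2.map Prod.fst))
    (d : Nat) : k ∉ (stS n k d).1 ↔ d < Nat.find hex := by
  rw [seen_char]
  constructor
  · intro h
    by_contra hlt
    exact h ⟨Nat.find hex, Nat.le_of_not_lt hlt, dStar_spec n k hex⟩
  · intro hlt ⟨e, he, hke⟩
    exact absurd hlt (not_lt.mpr (le_trans (Nat.find_le hke) he))

-- ---------- A's pruning drain: once every queued node is at least as deep as k ----------
theorem drainA (k : Int) (hk1 : 1 ≤ k) :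
    ∀ (q : List Int) (fuel : Nat) (V : Int → Int × Int),
      (V k).1 ≠ 0 →
      (∀ x ∈ q, 0 ≤ x ∧ (V k).1 ≤ (V x).1) →
      q.length ≤ fuel →
      solveLoopA k fuel q V = ((V k).1 - 1, (V k).2) := by
  intro q
  induction q with
  | nil =>
    intro fuel V hk _ _
    cases fuel <;> simp [solveLoopA, pyListIdx_nonneg _ (by omega : (0:Int) ≤ k)]
  | cons x t ih =>
    intro fuel V hk hq hlen
    cases fuel with
    | zero => simp at hlen
    | succ f =>
      obtain ⟨hx0, hxk⟩ := hq x (List.mem_cons_self)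
      have hprune : ∀ y q', solveStepA k x y ((V x).1) V q' = (V, q') := by
        intro y q'
        unfold solveStepA
        rw [if_pos]
        rw [pyListIdx_nonneg _ (by omega : (0:Int) ≤ k)]
        exact ⟨hk, by omega⟩
      have hlen' : t.length ≤ f := by simp at hlen; omega
      simp only [solveLoopA, pyListIdx_nonneg _ hx0, hprune]
      exact ih f V hk (fun z hz => hq z (List.mem_cons_of_mem _ hz)) hlen' 

-- ---------- one neighbour step preserves the coupling invariant ----------
theorem step_main (k : Int) (hk1 : 1 ≤ k) (d : Nat) (seen : PySem.Set Int)
    (hkseen : k ∉ seen) (x w y : Int) (hx : x ∈ seen) (hx0 : 0 ≤ x)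
    (nx : PySem.Dict Int Int) (T : List Int) (V : Int → Int × Int)
    (hnd : nx.keys.Nodup)
    (hnxV : ∀ z c, nx.get? z = some c → V z = ((d : Int) + 2, c))
    (hseenV : ∀ z, z ∈ seen → 1 ≤ (V z).1 ∧ (V z).1 ≤ (d : Int) + 1)
    (hfresh : ∀ z, z ∉ seen → nx.contains z = false → V z = (0, 0))
    (hxV : V x = ((d : Int) + 1, w)) :
    (solveStepA k x y ((d : Int) + 1) V (T ++ nx.keys)).2 = T ++ (bNbrStep k seen w nx y).keys ∧
    (bNbrStep k seen w nx y).keys.Nodup ∧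
    (∀ z c, (bNbrStep k seen w nx y).get? z = some c →
      (solveStepA k x y ((d : Int) + 1) V (T ++ nx.keys)).1 z = ((d : Int) + 2, c)) ∧
    (∀ z, z ∈ seen → (solveStepA k x y ((d : Int) + 1) V (T ++ nx.keys)).1 z = V z) ∧
    (∀ z, z ∉ seen → (bNbrStep k seen w nx y).contains z = false →
      (solveStepA k x y ((d : Int) + 1) V (T ++ nx.keys)).1 z = (0, 0)) ∧
    MM k (solveStepA k x y ((d : Int) + 1) V (T ++ nx.keys)).2
      (solveStepA k x y ((d : Int) + 1) V (T ++ nx.keys)).1 ≤ MM k (T ++ nx.keys) V := by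
  have hidk : pyListIdx (k + 2) k = k := pyListIdx_nonneg _ (by omega)
  have hidx : pyListIdx (k + 2) x = x := pyListIdx_nonneg _ hx0
  have hd0 : (0 : Int) ≤ (d : Int) := Int.natCast_nonneg d
  have hnoprune : ¬((V (pyListIdx (k + 2) k)).1 ≠ 0 ∧
      (V (pyListIdx (k + 2) k)).1 < ((d : Int) + 1) + 1) := by
    rw [hidk]
    rcases hgk : nx.get? k with _ | c
    · have := hfresh k hkseen (dict_fresh_of_get?_none nx k hgk)
      rw [this]
      change ¬((0 : Int) ≠ 0 ∧ (0 : Int) < (d : Int) + 1 + 1)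
      omega
    · have := hnxV k c hgk
      rw [this]
      change ¬(((d : Int) + 2) ≠ 0 ∧ ((d : Int) + 2) < (d : Int) + 1 + 1)
      omega
  unfold solveStepA
  rw [if_neg hnoprune]
  by_cases hy : 0 < y ∧ y < k + 2
  · rw [if_neg (not_not_intro hy)]
    by_cases hys : y ∈ seen
    · obtain ⟨h1y, h2y⟩ := hseenV y hys
      rw [if_pos (by omega : (V y).1 ≠ 0), if_pos (by omega : (d : Int) + 1 + 1 > (V y).1)]
      have hguard : ¬(0 < y ∧ y ≤ k + 1 ∧ y ∉ seen) := fun ⟨_, _, h⟩ => h hys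
      unfold bNbrStep
      rw [if_neg hguard]
      exact ⟨rfl, hnd, hnxV, fun z _ => rfl, hfresh, le_refl _⟩
    · have hguard : 0 < y ∧ y ≤ k + 1 ∧ y ∉ seen := ⟨hy.1, by omega, hys⟩
      by_cases hcy : nx.contains y
      · obtain ⟨cv, hgv⟩ := dict_get?_of_contains nx y hcy
        have hVy := hnxV y cv hgv
        rw [if_pos (by rw [hVy]; change ((d : Int) + 2) ≠ 0; omega : (V y).1 ≠ 0),
            if_neg (by rw [hVy]; change ¬((d : Int) + 1 + 1 > (d : Int) + 2); omega :
              ¬((d : Int) + 1 + 1 > (V y).1))]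
        have hgetD : nx.getD y 0 = cv := by
          rw [PySem.Dict.getD_eq_get?_getD, hgv]; rfl
        unfold bNbrStep
        rw [if_pos hguard, hgetD]
        refine ⟨?_, ?_, ?_, ?_, ?_, ?_⟩
        · simp only
          rw [PySem.Dict.keys_insert_of_contains nx _ hcy]
        · rw [PySem.Dict.keys_insert_of_contains nx _ hcy]; exact hnd
        · intro z c hz
          rw [PySem.Dict.get?_insert] at hz
          by_cases hzy : z = y
          · subst hzy
            rw [if_pos rfl] at hz
            cases hz
            simp only [updV_self, hVy, hidx, hxV]
          · rw [if_neg hzy] at hz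
            simp only [updV_ne _ _ _ hzy]
            exact hnxV z c hz
        · intro z hz
          have hzy : z ≠ y := fun h => hys (h ▸ hz)
          simp only [updV_ne _ _ _ hzy]
        · intro z hz hcz
          rw [PySem.Dict.contains_insert] at hcz
          simp only [Bool.or_eq_false_iff, beq_eq_false_iff_ne, ne_eq] at hcz
          simp only [updV_ne _ _ _ hcz.1]
          exact hfresh z hz hcz.2
        · show MM k (T ++ nx.keys)
              (updV V y ((V y).1, (V y).2 + (V (pyListIdx (k + 2) x)).2)) ≤ MM k (T ++ nx.keys) V
          unfold MM
          rw [MU_same k V y ((V y).1, (V y).2 + (V (pyListIdx (k + 2) x)).2) rfl]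
      · have hcy' : nx.contains y = false := by simpa using hcy
        have hVy := hfresh y hys hcy'
        rw [if_neg (by rw [hVy]; change ¬((0 : Int) ≠ 0); omega : ¬(V y).1 ≠ 0)]
        have hxy : x ≠ y := fun h => hys (h ▸ hx)
        have hcollapse :
            updV (updV V y ((d : Int) + 1 + 1, (V y).2)) y
              ((updV V y ((d : Int) + 1 + 1, (V y).2) y).1,
               (updV V y ((d : Int) + 1 + 1, (V y).2) y).2 +
               (updV V y ((d : Int) + 1 + 1, (V y).2) (pyListIdx (k + 2) x)).2)
            = updV V y ((d : Int) + 2, (V y).2 + w) := by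
          rw [updV_updV]
          have hval : ((updV V y ((d : Int) + 1 + 1, (V y).2) y).1,
               (updV V y ((d : Int) + 1 + 1, (V y).2) y).2 +
               (updV V y ((d : Int) + 1 + 1, (V y).2) (pyListIdx (k + 2) x)).2)
              = ((d : Int) + 2, (V y).2 + w) := by
            rw [updV_self, hidx, updV_ne _ _ _ hxy, hxV]
            show ((d : Int) + 1 + 1, (V y).2 + w) = ((d : Int) + 2, (V y).2 + w)
            rw [show (d : Int) + 1 + 1 = (d : Int) + 2 by ring]
          rw [hval]
        have hgetD : nx.getD y 0 = 0 := PySem.Dict.getD_of_not_contains nx 0 hcy'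
        unfold bNbrStep
        rw [if_pos hguard, hgetD]
        have hkeys := PySem.Dict.keys_insert_of_not_contains nx ((0:Int) + w) hcy'
        refine ⟨?_, ?_, ?_, ?_, ?_, ?_⟩
        · rw [hkeys, ← List.append_assoc]
        · exact PySem.Dict.nodup_keys_insert _ _ _ hnd
        · intro z c hz
          rw [PySem.Dict.get?_insert] at hz
          by_cases hzy : z = y
          · subst hzy
            rw [if_pos rfl] at hz
            cases hz
            rw [hcollapse]
            simp [updV, hVy]
          · rw [if_neg hzy] at hz
            simp only [updV_ne _ _ _ hzy]
            exact hnxV z c hz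
        · intro z hz
          have hzy : z ≠ y := fun h => hys (h ▸ hz)
          simp only [updV_ne _ _ _ hzy]
        · intro z hz hcz
          rw [PySem.Dict.contains_insert] at hcz
          simp only [Bool.or_eq_false_iff, beq_eq_false_iff_ne, ne_eq] at hcz
          simp only [updV_ne _ _ _ hcz.1]
          exact hfresh z hz hcz.2
        · simp only [hcollapse]
          unfold MM
          have hflip := MU_flip k V y ((d : Int) + 2, (V y).2 + w)
            (by rw [Finset.mem_Icc]; omega) (by rw [hVy])
            (by change ((d : Int) + 2) ≠ 0; omega)
          simp only [List.length_append, List.length_cons, List.length_nil]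
          omega
  · rw [if_pos hy]
    have hguard : ¬(0 < y ∧ y ≤ k + 1 ∧ y ∉ seen) := by
      intro ⟨h1, h2, _⟩; exact hy ⟨h1, by omega⟩
    unfold bNbrStep
    rw [if_neg hguard]
    exact ⟨rfl, hnd, hnxV, fun z _ => rfl, hfresh, le_refl _⟩

-- ---------- all pops of one BFS phase ----------
theorem popsA (n k : Int) (h0 : 0 ≤ n) (hnk : n < k) (d : Nat)
    (seen : PySem.Set Int) (fr : List (Int × Int))
    (hst : stS n k d = (seen, fr)) (hk : k ∉ seen) :
    ∀ (F P : List (Int × Int)) (nx : PySem.Dict Int Int) (V : Int → Int × Int) (fuel : Nat),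
      fr = P ++ F →
      nx = bPartial k seen P →
      (∀ p ∈ F, V p.1 = ((d : Int) + 1, p.2)) →
      (∀ z c, nx.get? z = some c → V z = ((d : Int) + 2, c)) →
      (∀ z, z ∈ seen → 1 ≤ (V z).1 ∧ (V z).1 ≤ (d : Int) + 1) →
      (∀ z, z ∉ seen → nx.contains z = false → V z = (0, 0)) →
      MM k (F.map Prod.fst ++ nx.keys) V ≤ fuel →
      ∃ (fuel' : Nat) (V' : Int → Int × Int),
        solveLoopA k fuel (F.map Prod.fst ++ nx.keys) V
          = solveLoopA k fuel' ((bPartial k seen fr).keys) V' ∧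
        MM k ((bPartial k seen fr).keys) V' ≤ fuel' ∧
        (∀ z c, (bPartial k seen fr).get? z = some c → V' z = ((d : Int) + 2, c)) ∧
        (∀ z, z ∈ seen → 1 ≤ (V' z).1 ∧ (V' z).1 ≤ (d : Int) + 1) ∧
        (∀ z, z ∉ seen → (bPartial k seen fr).contains z = false → V' z = (0, 0)) := by
  have hk1 : (1 : Int) ≤ k := by omega
  intro F
  induction F with
  | nil =>
    intro P nx V fuel hfr hnx hF hnxV hseenV hfresh hfuel
    refine ⟨fuel, V, ?_, ?_, ?_, hseenV, ?_⟩
    · rw [hfr, List.append_nil, ← hnx]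
      simp
    · rw [hfr, List.append_nil, ← hnx]
      simpa using hfuel
    · rw [hfr, List.append_nil, ← hnx]; exact hnxV
    · rw [hfr, List.append_nil, ← hnx]; exact hfresh
  | cons hd tl ih =>
    intro P nx V fuel hfr hnx hF hnxV hseenV hfresh hfuel
    obtain ⟨x, w⟩ := hd
    have hxfr : (x, w) ∈ fr := by rw [hfr]; exact List.mem_append_right _ List.mem_cons_self
    have hxseen : x ∈ seen := by
      have := (stW n k h0 d).1 (x, w) (by rw [hst] at *; exact hxfr)
      rw [hst] at this; exact this
    have hx0 : 0 ≤ x := by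
      have := (stW n k h0 d).2.2 (x, w) (by rw [hst]; exact hxfr)
      exact this
    have hndnx : nx.keys.Nodup := by rw [hnx]; exact keys_bPartial_nodup k seen P
    have hxV : V x = ((d : Int) + 1, w) := hF (x, w) List.mem_cons_self
    cases fuel with
    | zero =>
      exfalso
      unfold MM at hfuel
      simp at hfuel
    | succ f =>
      simp only [List.map_cons, List.cons_append, solveLoopA, pyListIdx_nonneg _ hx0, hxV]
      have s1 := step_main k hk1 d seen hk x w (x - 1) hxseen hx0 nx
        (tl.map Prod.fst) V hndnx hnxV hseenV hfresh hxV
      obtain ⟨e1q, e1nd, e1nx, e1seen, e1fresh, e1M⟩ := s1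
      set V1 := (solveStepA k x (x - 1) ((d : Int) + 1) V (tl.map Prod.fst ++ nx.keys)).1 with hV1
      set nx1 := bNbrStep k seen w nx (x - 1) with hnx1
      have hxV1 : V1 x = ((d : Int) + 1, w) := by rw [e1seen x hxseen, hxV]
      have hF1 : ∀ p ∈ tl, V1 p.1 = ((d : Int) + 1, p.2) := by
        intro p hp
        have : p.1 ∈ seen := by
          have := (stW n k h0 d).1 p (by rw [hst]; rw [hfr]; exact List.mem_append_right _ (List.mem_cons_of_mem _ hp))
          rw [hst] at this; exact this
        rw [e1seen p.1 this]; exact hF p (List.mem_cons_of_mem _ hp)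
      have hseenV1 : ∀ z, z ∈ seen → 1 ≤ (V1 z).1 ∧ (V1 z).1 ≤ (d : Int) + 1 := by
        intro z hz; rw [e1seen z hz]; exact hseenV z hz
      rw [e1q]
      have s2 := step_main k hk1 d seen hk x w (x + 1) hxseen hx0 nx1
        (tl.map Prod.fst) V1 e1nd e1nx hseenV1 e1fresh hxV1
      obtain ⟨e2q, e2nd, e2nx, e2seen, e2fresh, e2M⟩ := s2
      set V2 := (solveStepA k x (x + 1) ((d : Int) + 1) V1 (tl.map Prod.fst ++ nx1.keys)).1 with hV2
      set nx2 := bNbrStep k seen w nx1 (x + 1) with hnx2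
      have hxV2 : V2 x = ((d : Int) + 1, w) := by rw [e2seen x hxseen, hxV1]
      have hF2 : ∀ p ∈ tl, V2 p.1 = ((d : Int) + 1, p.2) := by
        intro p hp
        have hpseen : p.1 ∈ seen := by
          have := (stW n k h0 d).1 p (by rw [hst]; rw [hfr]; exact List.mem_append_right _ (List.mem_cons_of_mem _ hp))
          rw [hst] at this; exact this
        rw [e2seen p.1 hpseen]; exact hF1 p hp
      have hseenV2 : ∀ z, z ∈ seen → 1 ≤ (V2 z).1 ∧ (V2 z).1 ≤ (d : Int) + 1 := by
        intro z hz; rw [e2seen z hz]; exact hseenV1 z hz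
      rw [e2q]
      have s3 := step_main k hk1 d seen hk x w (x * 2) hxseen hx0 nx2
        (tl.map Prod.fst) V2 e2nd e2nx hseenV2 e2fresh hxV2
      obtain ⟨e3q, e3nd, e3nx, e3seen, e3fresh, e3M⟩ := s3
      set V3 := (solveStepA k x (x * 2) ((d : Int) + 1) V2 (tl.map Prod.fst ++ nx2.keys)).1 with hV3
      set nx3 := bNbrStep k seen w nx2 (x * 2) with hnx3
      have hF3 : ∀ p ∈ tl, V3 p.1 = ((d : Int) + 1, p.2) := by
        intro p hp
        have hpseen : p.1 ∈ seen := by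
          have := (stW n k h0 d).1 p (by rw [hst]; rw [hfr]; exact List.mem_append_right _ (List.mem_cons_of_mem _ hp))
          rw [hst] at this; exact this
        rw [e3seen p.1 hpseen]; exact hF2 p hp
      have hseenV3 : ∀ z, z ∈ seen → 1 ≤ (V3 z).1 ∧ (V3 z).1 ≤ (d : Int) + 1 := by
        intro z hz; rw [e3seen z hz]; exact hseenV2 z hz
      rw [e3q]
      -- nx3 is the partial dictionary for the extended prefix
      have hnx3P : nx3 = bPartial k seen (P ++ [(x, w)]) := by
        rw [hnx3, hnx2, hnx1, hnx, mul_comm x 2]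
        unfold bPartial
        rw [List.foldl_append, List.foldl_cons, List.foldl_nil]
        rfl
      have hfuel3 : MM k (tl.map Prod.fst ++ nx3.keys) V3 ≤ f := by
        have h1 : MM k (tl.map Prod.fst ++ nx.keys) V ≤ f := by
          unfold MM at hfuel ⊢
          simp only [List.map_cons, List.cons_append, List.length_cons] at hfuel
          omega
        calc MM k (tl.map Prod.fst ++ nx3.keys) V3
            ≤ MM k (tl.map Prod.fst ++ nx2.keys) V2 := by rw [← e3q]; exact e3M
          _ ≤ MM k (tl.map Prod.fst ++ nx1.keys) V1 := by rw [← e2q]; exact e2M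
          _ ≤ MM k (tl.map Prod.fst ++ nx.keys) V := by rw [← e1q]; exact e1M
          _ ≤ f := h1
      exact ih (P ++ [(x, w)]) nx3 V3 f (by rw [hfr, List.append_assoc]; rfl)
        hnx3P hF3 e3nx hseenV3 e3fresh hfuel3

-- ---------- one phase, then all later phases ----------
theorem phaseA (n k : Int) (h0 : 0 ≤ n) (hnk : n < k)
    (hex : ∃ d, k ∈ ((stS n k d).2.map Prod.fst)) :
    ∀ (e d : Nat) (seen : PySem.Set Int) (fr : List (Int × Int))
      (V : Int → Int × Int) (fuel : Nat),
      Nat.find hex - d = e →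
      stS n k d = (seen, fr) →
      k ∉ seen →
      (∀ p ∈ fr, V p.1 = ((d : Int) + 1, p.2)) →
      (∀ z, z ∈ seen → 1 ≤ (V z).1 ∧ (V z).1 ≤ (d : Int) + 1) →
      (∀ z, z ∉ seen → V z = (0, 0)) →
      MM k (fr.map Prod.fst) V ≤ fuel →
      solveLoopA k fuel (fr.map Prod.fst) V = (((Nat.find hex : Nat) : Int), cStar n k hex) := by
  have hk1 : (1 : Int) ≤ k := by omega
  intro e
  induction e with
  | zero =>
    intro d seen fr V fuel he hst hk _ _ _ _
    exfalso
    have hd : d < Nat.find hex := (not_seen_iff_lt_dStar n k hex d).mp (by rw [hst]; exact hk)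
    omega
  | succ e ih =>
    intro d seen fr V fuel he hst hk hF hseenV hfresh hfuel
    have hdlt : d < Nat.find hex := (not_seen_iff_lt_dStar n k hex d).mp (by rw [hst]; exact hk)
    -- run the pops of this phase
    obtain ⟨fuel', V', heq, hfuel', hnxV', hseenV', hfresh'⟩ :=
      popsA n k h0 hnk d seen fr hst hk fr [] PySem.Dict.empty V fuel
        (by simp) rfl hF (by intro z c h; rw [PySem.Dict.get?_empty] at h; cases h)
        hseenV (by intro z hz _; exact hfresh z hz)
        (by simpa [PySem.Dict.keys_empty] using hfuel)
    rw [show (fr.map Prod.fst ++ PySem.Dict.empty.keys) = fr.map Prod.fst by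
      rw [PySem.Dict.keys_empty, List.append_nil]] at heq
    rw [heq]
    set nxf := bPartial k seen fr with hnxf
    have hstS1 : stS n k (d + 1) = (PySem.Set.update seen nxf.keys, nxf.items) := by
      simp only [stS, hst]
      rw [bLevelNext_eq_bPartial]
    by_cases hkk : k ∈ nxf.keys
    · -- k is discovered in this phase: d + 1 = dStar, the queue drains under pruning
      have hdk : Nat.find hex ≤ d + 1 := by
        apply Nat.find_le
        rw [hstS1]
        simpa [dictKeys_eq] using hkk
      have hdeq : Nat.find hex = d + 1 := by omega
      obtain ⟨c, hgc⟩ := dict_get?_of_contains nxf k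
        ((PySem.Dict.contains_iff_mem_keys _ _).mpr hkk)
      have hVk := hnxV' k c hgc
      have hdrain := drainA k hk1 nxf.keys fuel' V'
        (by rw [hVk]; change ((d : Int) + 2) ≠ 0; omega)
        (by
          intro z hz
          refine ⟨le_of_lt (mem_keys_bPartial hz).1, ?_⟩
          obtain ⟨cz, hgz⟩ := dict_get?_of_contains nxf z
            ((PySem.Dict.contains_iff_mem_keys _ _).mpr hz)
          rw [hVk, hnxV' z cz hgz])
        (le_trans (by unfold MM; omega) hfuel')
      rw [hdrain, hVk]
      have hc : cStar n k hex = c := by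
        unfold cStar
        have hmem : (k, c) ∈ nxf.items :=
          (PySem.Dict.get?_eq_some_iff_mem_items nxf k c (keys_bPartial_nodup k seen fr)).mp hgc
        have hndk : ((stS n k (Nat.find hex)).2.map Prod.fst).Nodup := (stW n k h0 _).2.1
        rw [hdeq, hstS1] at hndk ⊢
        simp only
        rw [find?_eq_of_nodup_keys hndk hmem]
      rw [hc, hdeq]
      refine Prod.ext ?_ rfl
      show (d : Int) + 2 - 1 = ((d + 1 : Nat) : Int)
      push_cast; ring
    · -- k not discovered: move to the next phase
      have hknotseen : k ∉ PySem.Set.update seen nxf.keys := by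
        rw [PySem.Set.mem_update]
        intro h
        rcases h with h | h
        · exact hk h
        · exact hkk h
      have hkeysitems : nxf.keys = nxf.items.map Prod.fst := dictKeys_eq nxf
      have happly := ih (d + 1) (PySem.Set.update seen nxf.keys) nxf.items V' fuel'
        (by omega) hstS1 hknotseen
        (by
          intro p hp
          have := PySem.Dict.get?_of_mem_items nxf hp (keys_bPartial_nodup k seen fr)
          have h2 := hnxV' p.1 p.2 this
          rw [h2]
          refine Prod.ext ?_ rfl
          show (d : Int) + 2 = ((d + 1 : Nat) : Int) + 1
          push_cast; ring)
        (by
          intro z hz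
          rcases (PySem.Set.mem_update _ _ _).mp hz with hz | hz
          · obtain ⟨a, b⟩ := hseenV' z hz
            refine ⟨a, by push_cast; omega⟩
          · obtain ⟨cz, hgz⟩ := dict_get?_of_contains nxf z
              ((PySem.Dict.contains_iff_mem_keys _ _).mpr hz)
            rw [hnxV' z cz hgz]
            constructor
            · change (1 : Int) ≤ (d : Int) + 2; omega
            · change ((d : Int) + 2) ≤ ((d + 1 : Nat) : Int) + 1; push_cast; omega)
        (by
          intro z hz
          rw [PySem.Set.mem_update] at hz
          have hz1 : z ∉ seen := fun h => hz (Or.inl h)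
          have hz2 : z ∉ nxf.keys := fun h => hz (Or.inr h)
          refine hfresh' z hz1 ?_
          rcases hg : nxf.contains z with _ | _
          · rfl
          · exact absurd ((PySem.Dict.contains_iff_mem_keys _ _).mp hg) hz2)
        (by rw [← hkeysitems]; exact hfuel')
      rw [← hkeysitems] at happly
      exact happly

-- ---------- B's loop follows the level states ----------
theorem loopB_eq (n k : Int) (h0 : 0 ≤ n) (_hnk : n < k)
    (hex : ∃ d, k ∈ ((stS n k d).2.map Prod.fst)) :
    ∀ (e d : Nat) (fuel : Nat) (seen : PySem.Set Int) (fr : List (Int × Int)),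
      stS n k d = (seen, fr) →
      d ≤ Nat.find hex →
      Nat.find hex - d = e →
      e + 1 ≤ fuel →
      solveLoopB k fuel seen fr ((d : Nat) : Int) = (((Nat.find hex : Nat) : Int), cStar n k hex) := by
  intro e
  induction e with
  | zero =>
    intro d fuel seen fr hst hd he hfuel
    have hdeq : d = Nat.find hex := by omega
    subst hdeq
    cases fuel with
    | zero => omega
    | succ f =>
      have hkin : k ∈ (fr.map Prod.fst) := by
        have := dStar_spec n k hex
        rw [hst] at this; exact this
      obtain ⟨p, hp, hpk⟩ := List.mem_map.mp hkin
      have hfind : fr.find? (fun p => p.1 == k) = some (k, p.2) := by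
        have hnd : (fr.map Prod.fst).Nodup := by
          have := (stW n k h0 (Nat.find hex)).2.1
          rw [hst] at this; exact this
        apply find?_eq_of_nodup_keys hnd
        have hpe : p = (k, p.2) := by
          rcases p with ⟨p1, p2⟩; simp at hpk ⊢; exact hpk
        rw [← hpe]; exact hp
      have hfrne : ¬fr.isEmpty := by
        intro hempty
        rw [List.isEmpty_iff] at hempty
        rw [hempty] at hkin
        simp at hkin
      simp only [solveLoopB, hfind]
      rw [if_neg hfrne]
      have hcS : cStar n k hex = p.2 := by
        unfold cStar
        rw [hst]
        simp only [hfind]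
      rw [hcS]
  | succ e ih =>
    intro d fuel seen fr hst hd he hfuel
    cases fuel with
    | zero => omega
    | succ f =>
      have hdlt : d < Nat.find hex := by omega
      have hfrne : fr ≠ [] := by
        intro hempty
        have hper := fr_persist n k d (by rw [hst]; exact hempty) (Nat.find hex - d)
        have : d + (Nat.find hex - d) = Nat.find hex := by omega
        rw [this] at hper
        have := dStar_spec n k hex
        rw [hper] at this
        simp at this
      have hfind : fr.find? (fun p => p.1 == k) = none := by
        rw [List.find?_eq_none]
        intro p hp hpk
        have hpk' : p.1 = k := by simpa using hpk
        have hkmem : k ∈ ((stS n k d).2.map Prod.fst) := by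
          rw [hst]; exact List.mem_map.mpr ⟨p, hp, hpk'⟩
        have hfle : Nat.find hex ≤ d := Nat.find_le hkmem
        omega
      simp only [solveLoopB, hfind]
      rw [if_neg (by simpa [List.isEmpty_iff] using hfrne)]
      have hstS1 : stS n k (d + 1)
          = (PySem.Set.update seen (bLevelNext k seen fr).keys, (bLevelNext k seen fr).items) := by
        simp only [stS, hst]
      have hcast : ((d : Nat) : Int) + 1 = (((d + 1 : Nat) : Nat) : Int) := by push_cast; ring
      rw [hcast]
      exact ih (d + 1) f _ _ hstS1 (by omega) (by omega) (by omega)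

-- ---------- the main equivalence on 0 ≤ n < k ----------
theorem main_pos (n k : Int) (h0 : 0 ≤ n) (hnk : n < k) : solve n k = solve_alt n k := by
  have hk1 : (1 : Int) ≤ k := by omega
  obtain ⟨dr, hdr, hdrle⟩ := reach n k h0 hnk
  have hex : ∃ d, k ∈ ((stS n k d).2.map Prod.fst) := ⟨dr, hdr⟩
  have hdSle : Nat.find hex ≤ (k - n).toNat := le_trans (Nat.find_le hdr) hdrle
  have hkn : ¬ k ≤ n := by omega
  -- A side
  have hA : solve n k = (((Nat.find hex : Nat) : Int), cStar n k hex) := by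
    unfold solve
    rw [if_neg hkn, pyListIdx_nonneg _ h0]
    have hst0 : stS n k 0 = (PySem.Set.ofList [n], [(n, 1)]) := rfl
    have hseen0 : (PySem.Set.ofList [n] : PySem.Set Int) = [n] :=
      PySem.Set.ofList_eq_self_of_nodup _ (List.nodup_singleton n)
    apply phaseA n k h0 hnk hex (Nat.find hex) 0 _ _ _ _ rfl hst0
    · rw [hseen0]
      intro h
      rcases List.mem_singleton.mp h with rfl
      omega
    · intro p hp
      rcases List.mem_singleton.mp hp with rfl
      simp only [updV_self]
      norm_num
    · intro z hz
      rw [hseen0] at hz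
      rcases List.mem_singleton.mp hz with rfl
      simp only [updV_self]
      norm_num
    · intro z hz
      rw [hseen0] at hz
      have : z ≠ n := fun h => hz (h ▸ List.mem_singleton.mpr rfl)
      rw [updV_ne _ _ _ this]
    · show MM k [n] _ ≤ 3 * (k + 2).toNat + 3
      unfold MM
      have := MU_le k (updV (fun _ => (0, 0)) n (1, 1))
      have h12 : (k + 1).toNat ≤ (k + 2).toNat := Int.toNat_le_toNat (by omega)
      simp only [List.length_cons, List.length_nil]
      omega
  -- B side
  have hB : solve_alt n k = (((Nat.find hex : Nat) : Int), cStar n k hex) := by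
    unfold solve_alt
    rw [if_neg hkn]
    have hfuel : Nat.find hex + 1 ≤ (k + 2).toNat + 2 := by
      have : (k - n).toNat ≤ (k + 2).toNat := Int.toNat_le_toNat (by omega)
      omega
    have := loopB_eq n k h0 hnk hex (Nat.find hex) 0 ((k + 2).toNat + 2)
      (PySem.Set.ofList [n]) [(n, 1)] rfl (by omega) (by omega) hfuel
    simpa using this
  rw [hA, hB]

-- ---------- the negative-start region inside Pre_ ----------
theorem stepA_skip (k x y c : Int) (V : Int → Int × Int) (q : List Int)
    (hnp : ¬((V (pyListIdx (k + 2) k)).1 ≠ 0 ∧ (V (pyListIdx (k + 2) k)).1 < c + 1))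
    (hy : ¬(0 < y ∧ y < k + 2)) : solveStepA k x y c V q = (V, q) := by
  unfold solveStepA
  rw [if_neg hnp, if_pos hy]

theorem stepA_prune (k x y c : Int) (V : Int → Int × Int) (q : List Int)
    (hp : (V (pyListIdx (k + 2) k)).1 ≠ 0 ∧ (V (pyListIdx (k + 2) k)).1 < c + 1) :
    solveStepA k x y c V q = (V, q) := by
  unfold solveStepA
  rw [if_pos hp]

theorem neg_A (n k : Int) (hn : n ≤ -1) (hnk : n < k) (hnn : -(k + 2) ≤ n) (hne2 : n ≠ -2) :
    solve n k = (-1, 0) := by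
  have hk0 : (0 : Int) ≤ k := by omega
  unfold solve
  rw [if_neg (by omega : ¬ k ≤ n)]
  rw [pyListIdx_neg _ (by omega : n < 0)]
  set m := n + (k + 2) with hm
  set V := updV (fun _ => (0, 0)) m (1, 1) with hV
  have hmk : m ≠ k := by omega
  have hVk : V k = (0, 0) := by rw [hV, updV_ne _ _ _ (by omega : k ≠ m)]
  have hidk : pyListIdx (k + 2) k = k := pyListIdx_nonneg _ hk0
  have hnoprune : ∀ c : Int, ¬((V (pyListIdx (k + 2) k)).1 ≠ 0 ∧ (V (pyListIdx (k + 2) k)).1 < c + 1) := by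
    intro c
    rw [hidk, hVk]
    simp
  have hfuel : 3 * (k + 2).toNat + 3 = (3 * (k + 2).toNat + 2) + 1 := rfl
  rw [hfuel]
  simp only [solveLoopA]
  rw [stepA_skip _ _ _ _ _ _ (hnoprune _) (by omega),
      stepA_skip _ _ _ _ _ _ (hnoprune _) (by omega),
      stepA_skip _ _ _ _ _ _ (hnoprune _) (by omega)]
  simp only [solveLoopA, hidk, hVk]
  norm_num

theorem neg_B (n k : Int) (hn : n ≤ -1) (hnk : n < k) : solve_alt n k = (-1, 0) := by
  unfold solve_alt
  rw [if_neg (by omega : ¬ k ≤ n)]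
  have hfuel : (k + 2).toNat + 2 = (((k + 2).toNat + 1) + 1 : Nat) := rfl
  rw [hfuel]
  simp only [solveLoopB]
  have hne : (n == k) = false := by
    simp only [beq_eq_false_iff_ne, ne_eq]
    omega
  have hfind : ([(n, 1)] : List (Int × Int)).find? (fun p => p.1 == k) = none := by
    simp [List.find?, hne]
  rw [hfind]
  simp only [List.isEmpty_cons, Bool.false_eq_true, if_false]
  have hnxt : bLevelNext k (PySem.Set.ofList [n]) [(n, 1)] = PySem.Dict.empty := by
    unfold bLevelNext bInner
    simp only [List.foldl_cons, List.foldl_nil]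
    unfold bNbrStep
    rw [if_neg (by simp; omega), if_neg (by simp; omega), if_neg (by simp; omega)]
  rw [hnxt, dictItems_empty]
  simp only [List.isEmpty_nil, if_true]

theorem tight_A (k : Int) (hk0 : 0 ≤ k) : solve (-2) k = (0, 1) := by
  unfold solve
  rw [if_neg (by omega : ¬ k ≤ -2)]
  rw [pyListIdx_neg _ (by omega : (-2 : Int) < 0)]
  have hm : (-2 : Int) + (k + 2) = k := by ring
  rw [hm]
  set V := updV (fun _ => (0, 0)) k (1, 1) with hV
  have hVk : V k = (1, 1) := by rw [hV, updV_self]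
  have hidk : pyListIdx (k + 2) k = k := pyListIdx_nonneg _ hk0
  have hid2 : pyListIdx (k + 2) (-2) = k := by rw [pyListIdx_neg _ (by omega : (-2:Int) < 0)]; ring
  have hprune : ∀ y q, solveStepA k (-2) y ((V (pyListIdx (k + 2) (-2))).1) V q = (V, q) := by
    intro y q
    apply stepA_prune
    rw [hidk, hVk, hid2, hVk]
    norm_num
  have hfuel : 3 * (k + 2).toNat + 3 = (3 * (k + 2).toNat + 2) + 1 := rfl
  rw [hfuel]
  simp only [solveLoopA, hprune]
  simp only [hidk, hVk]
  norm_num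

-- ===== VERDICT (by name: the statement is the Claim_ definition above) =====
theorem solve_spec : Claim_unchanged_solve := by
  intro n k _ hpre hnd
  by_cases hkn : k ≤ n
  · unfold solve solve_alt
    rw [if_pos hkn, if_pos hkn]
  · have hnk : n < k := by omega
    by_cases h0 : 0 ≤ n
    · exact main_pos n k h0 hnk
    · have hn1 : n ≤ -1 := by omega
      have hnn : -(k + 2) ≤ n := by
        rcases hpre with h | h
        · omega
        · exact h
      have hne2 : n ≠ -2 := fun h => hnd ⟨h, hnk⟩
      rw [neg_A n k hn1 hnk hnn hne2, neg_B n k hn1 hnk]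

theorem solve_changed : Claim_changed_solve := by
  unfold Claim_changed_solve
  refine ⟨by decide, by decide, by decide, by decide, by decide, by decide⟩

theorem solve_tight : Claim_exact_solve := by
  intro n k _ hpre hd
  obtain ⟨hn2, hnk⟩ := hd
  subst hn2
  have hk0 : (0 : Int) ≤ k := by
    rcases hpre with h | h <;> omega
  rw [tight_A k hk0, neg_B (-2) k (by omega) hnk]
  simp
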